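-- pv_equiv track=rewrite | github.com/Samuilad/PasswordBuffer | main.py | PassBuffer
-- ===== SOURCE A (Python) =====
-- def PassBuffer(password):
--     newpass = password
--     for i in password:
--         newpass += str(ord(i))
--     passlen = len(newpass)
--     characterlist= ["@", "$", "^", "*", "!", ")", "#", "&", "-", "(", "^%", "&$", "@^",
--                     "&!","'&", "$", "^", "*", "!", ")", "#", "&", "-", "^%", "&$", "@^"]
--     letterCombos = ["Sy", "Br", "hE", "zY", "JK", "Pw", "zo", "Vp","u", "x", "p", "w", "i", "Sy", "Br",
--                     "hE", "zY", "JK", "Pw", "zo", "Vp","u" ]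
--     numbers = ["12", "2", "53", "76", "374", "8", "0", "9", "63", "5", "12", "2", "53", " 76", "374"]
--     ASCI = []
--     listpass = []
--     for letter in newpass:
--         listpass.append(letter)
--
--     for character in newpass:
--         temp = str(ord(character))
--         ASCI.append(temp[-1])
--
--     for i in range(0, passlen, 2):
--         listpass[i] = characterlist[int(ASCI[i])]
--
--     for i in range(0, passlen, 3):
--         listpass[i] = letterCombos[int(ASCI[i])]
--
--     for i in range(0, passlen, 4) :
--         listpass[i] = numbers[int(ASCI[i])]
--     finalpass = "".join(listpass)
--
--     return finalpass
-- ===== SOURCE B (Python) =====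
-- def PassBuffer(password):
--     characterlist = ["@", "$", "^", "*", "!", ")", "#", "&", "-", "(", "^%", "&$", "@^",
--                      "&!", "'&", "$", "^", "*", "!", ")", "#", "&", "-", "^%", "&$", "@^"]
--     letterCombos = ["Sy", "Br", "hE", "zY", "JK", "Pw", "zo", "Vp", "u", "x", "p", "w", "i", "Sy", "Br",
--                     "hE", "zY", "JK", "Pw", "zo", "Vp", "u"]
--     numbers = ["12", "2", "53", "76", "374", "8", "0", "9", "63", "5", "12", "2", "53", " 76", "374"]
--     newpass = password + ''.join(str(ord(c)) for c in password)
--     out = []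
--     for i, c in enumerate(newpass):
--         d = ord(c) % 10
--         if i % 4 == 0:
--             out.append(numbers[d])
--         elif i % 3 == 0:
--             out.append(letterCombos[d])
--         elif i % 2 == 0:
--             out.append(characterlist[d])
--         else:
--             out.append(c)
--     return ''.join(out)
-- ===== Notes on version B (the rewrite author's own statement) =====
-- stated objective: simpler
-- what changed: Replaced A's three sequential stride-2/3/4 in-place overwrite passes (plus the separate last-ASCII-digit list) with a single enumerate pass that picks each output piece directly by last-writer-wins priority (i%4, then i%3, then i%2) using ord(c)%10 instead of the string last digit.
import Mathlib
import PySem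

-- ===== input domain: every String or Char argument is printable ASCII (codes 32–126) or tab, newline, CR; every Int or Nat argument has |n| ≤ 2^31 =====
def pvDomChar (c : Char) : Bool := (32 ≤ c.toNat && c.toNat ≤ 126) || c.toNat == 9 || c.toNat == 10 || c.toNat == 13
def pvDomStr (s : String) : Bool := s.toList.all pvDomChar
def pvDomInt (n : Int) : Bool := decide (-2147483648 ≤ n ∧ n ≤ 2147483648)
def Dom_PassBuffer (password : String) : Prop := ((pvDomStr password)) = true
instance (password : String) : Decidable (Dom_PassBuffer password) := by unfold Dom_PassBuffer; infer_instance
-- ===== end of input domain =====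

-- B replaces A's three sequential stride-2/3/4 overwrite passes (and A's separate last-ASCII-digit
-- list) with a single enumerate pass choosing each piece by last-writer-wins priority (simpler).

-- the three literal tables (identical literals in both Python sources)
def pvCharacterlist : List String := ["@", "$", "^", "*", "!", ")", "#", "&", "-", "(", "^%", "&$", "@^",
  "&!", "'&", "$", "^", "*", "!", ")", "#", "&", "-", "^%", "&$", "@^"]
def pvLetterCombos : List String := ["Sy", "Br", "hE", "zY", "JK", "Pw", "zo", "Vp", "u", "x", "p", "w", "i", "Sy", "Br",
  "hE", "zY", "JK", "Pw", "zo", "Vp", "u"]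
def pvNumbers : List String := ["12", "2", "53", "76", "374", "8", "0", "9", "63", "5", "12", "2", "53", " 76", "374"]

-- ===== PORT A =====
-- each '.getD' default below is unreachable: str(ord(c)) is nonempty, its last char is a digit 0–9,
-- and every table has more than 10 entries, so the Python never raises there
def PassBuffer (password : String) : String :=
  let pwd := password.toList
  -- newpass = password; for i in password: newpass += str(ord(i))
  let newpass : List Char := pwd.foldl (fun acc c => acc ++ PySem.Int.toChars (c.toNat : Int)) pwd
  let passlen : Int := PySem.List.len newpass
  -- for letter in newpass: listpass.append(letter)
  let listpass : List String := newpass.foldl (fun acc c => acc ++ [String.ofList [c]]) []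
  -- for character in newpass: temp = str(ord(character)); ASCI.append(temp[-1])
  let ASCI : List String := newpass.foldl
    (fun acc c => acc ++ [String.ofList [(PySem.Str.pyGet? (PySem.Int.toStr (c.toNat : Int)) (-1)).getD ' ']]) []
  -- listpass[i] = tbl[int(ASCI[i])]
  let repl : List String → Int → String := fun tbl i =>
    (PySem.List.pyGet? tbl ((PySem.Int.ofStr? (PySem.List.pyGetD ASCI i "")).getD 0)).getD ""
  let listpass := (PySem.List.pyRange 0 passlen 2).foldl
    (fun lp i => PySem.List.pySetD lp i (repl pvCharacterlist i)) listpass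
  let listpass := (PySem.List.pyRange 0 passlen 3).foldl
    (fun lp i => PySem.List.pySetD lp i (repl pvLetterCombos i)) listpass
  let listpass := (PySem.List.pyRange 0 passlen 4).foldl
    (fun lp i => PySem.List.pySetD lp i (repl pvNumbers i)) listpass
  PySem.Str.join "" listpass

-- ===== PORT B =====
-- the '.getD' defaults are unreachable (d = ord(c)%10 < 10 < each table's length)
def PassBuffer_alt (password : String) : String :=
  let pwd := password.toList
  -- newpass = password + ''.join(str(ord(c)) for c in password)
  let newpass : List Char := pwd ++ PySem.Chars.join [] (pwd.map (fun c => PySem.Int.toChars (c.toNat : Int)))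
  -- for i, c in enumerate(newpass): pick the piece by last-writer-wins priority
  let out : List String := (PySem.List.enumerate newpass 0).foldl
    (fun acc p =>
      acc ++ [ let d : Int := PySem.Int.mod ((p.2.toNat : Int)) 10
               if PySem.Int.mod p.1 4 = 0 then (PySem.List.pyGet? pvNumbers d).getD ""
               else if PySem.Int.mod p.1 3 = 0 then (PySem.List.pyGet? pvLetterCombos d).getD ""
               else if PySem.Int.mod p.1 2 = 0 then (PySem.List.pyGet? pvCharacterlist d).getD ""
               else String.ofList [p.2] ]) []
  PySem.Str.join "" out

-- ===== PRECONDITION & SPEC =====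
def Spec_PassBuffer (password : String) (out : String) : Prop := out = PassBuffer_alt password
instance (password : String) (out : String) : Decidable (Spec_PassBuffer password out) := by unfold Spec_PassBuffer; infer_instance

-- ===== CLAIM (what is proved, stated in full; the proofs are below) =====
def Claim_equal_PassBuffer : Prop := ∀ (password : String), Dom_PassBuffer password → Spec_PassBuffer password (PassBuffer password)

-- ===== LEMMAS AND PROOFS =====

-- ''.join over List Char pieces is concatenation
lemma pv_join_nil_flatten (parts : List (List Char)) : PySem.Chars.join [] parts = parts.flatten := by
  induction parts with
  | nil => rfl
  | cons p ps ih =>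
    cases ps with
    | nil => simp [PySem.Chars.join, List.intercalate]
    | cons q qs =>
      rw [PySem.Chars.join_cons_cons] at *
      simp_all

lemma pv_pySetD_length (lp : List String) (i : Int) (v : String) :
    (PySem.List.pySetD lp i v).length = lp.length := by
  simp only [PySem.List.pySetD, PySem.List.pySet?, PySem.List.pyIdx?]
  split <;> split <;> simp

lemma pv_foldl_pySetD_length (is : List Int) (g : Int → String) (lp : List String) :
    (is.foldl (fun l i => PySem.List.pySetD l i (g i)) lp).length = lp.length := by
  induction is generalizing lp with
  | nil => rfl
  | cons i is ih => rw [List.foldl_cons, ih, pv_pySetD_length]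

-- a pass of in-place assignments at nonnegative indices, pointwise (the value depends only on the index)
lemma pv_foldl_pySetD_getElem? : ∀ (is : List Int) (g : Int → String) (lp : List String) (j : Nat),
    (∀ i ∈ is, 0 ≤ i) → j < lp.length →
    (is.foldl (fun l i => PySem.List.pySetD l i (g i)) lp)[j]? =
      if ((j : Int) ∈ is) then some (g j) else lp[j]?
  | [], g, lp, j, h, hj => by simp
  | i :: is, g, lp, j, h, hj => by
    have hi : 0 ≤ i := h i (by simp)
    rw [List.foldl_cons, pv_foldl_pySetD_getElem? is g _ j (fun x hx => h x (by simp [hx]))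
        (by rw [PySem.List.pySetD_of_nonneg _ _ hi]; simpa using hj)]
    rw [PySem.List.pySetD_of_nonneg _ _ hi]
    by_cases hmem : (j : Int) ∈ is
    · simp [hmem]
    · by_cases heq : i = (j : Int)
      · subst heq
        simp [hmem, hj]
      · have hne : i.toNat ≠ j := by omega
        simp [hmem, hne]
        intro hc
        exact absurd hc.symm heq

-- for every code point m < 127, int(str(m)[-1]) = m % 10 (A's digit extraction vs B's mod)
set_option maxRecDepth 10000 in
lemma pv_digit_fin : ∀ m : Fin 127,
    (PySem.Int.ofStr? (String.ofList [(PySem.Str.pyGet? (PySem.Int.toStr ((m : Nat) : Int)) (-1)).getD ' '])).getD 0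
      = PySem.Int.mod ((m : Nat) : Int) 10 := by decide

lemma pv_digit_fact (m : Nat) (hm : m < 127) :
    (PySem.Int.ofStr? (String.ofList [(PySem.Str.pyGet? (PySem.Int.toStr (m : Int)) (-1)).getD ' '])).getD 0
      = PySem.Int.mod (m : Int) 10 := pv_digit_fin ⟨m, hm⟩

set_option maxRecDepth 10000 in
lemma pv_bound_fin : ∀ m : Fin 127,
    (PySem.Int.toChars ((m : Nat) : Int)).all (fun c => decide (c.toNat < 127)) = true := by decide

lemma pv_toChars_bound (m : Nat) (hm : m < 127) :
    ∀ c ∈ PySem.Int.toChars (m : Int), c.toNat < 127 := by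
  intro c hc
  have h := List.all_eq_true.mp (pv_bound_fin ⟨m, hm⟩) c hc
  simpa using h

-- ===== VERDICT (by name: the statement is the Claim_ definition above) =====
theorem PassBuffer_spec : Claim_equal_PassBuffer := by
  intro password hdom
  unfold Spec_PassBuffer
  have hpwd : ∀ c ∈ password.toList, c.toNat < 127 := by
    intro c hc
    have h := List.all_eq_true.mp hdom c hc
    simp only [pvDomChar] at h
    simp at h
    omega
  simp only [PassBuffer, PassBuffer_alt]
  rw [PySem.List.foldl_append_singleton_eq_map, PySem.List.foldl_append_singleton_eq_map,
      PySem.List.foldl_append_singleton_eq_map, PySem.List.foldl_append_eq_flatMap,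
      pv_join_nil_flatten, ← List.flatMap_def]
  have hbound : ∀ c ∈ password.toList ++ List.flatMap (fun c => PySem.Int.toChars ((c.toNat : Int))) password.toList, c.toNat < 127 := by
    intro c hc
    rcases List.mem_append.mp hc with h | h
    · exact hpwd c h
    · rcases List.mem_flatMap.mp h with ⟨x, hx, hcx⟩
      exact pv_toChars_bound x.toNat (hpwd x hx) c hcx
  simp only [List.nil_append]
  set np := password.toList ++ List.flatMap (fun c => PySem.Int.toChars ((c.toNat : Int))) password.toList with hnp
  congr 1
  rw [PySem.List.enumerate_eq_map_pyRange _ 'a', List.map_map]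
  simp only [PySem.List.len_eq]
  apply List.ext_getElem?
  intro j
  by_cases hj : j < np.length
  · -- in-range positions
    rw [pv_foldl_pySetD_getElem? _ _ _ j (fun x hx => ((PySem.List.mem_pyRange_iff_of_pos (by norm_num) x).1 hx).1)
          (by rw [pv_foldl_pySetD_length, pv_foldl_pySetD_length, List.length_map]; exact hj),
        pv_foldl_pySetD_getElem? _ _ _ j (fun x hx => ((PySem.List.mem_pyRange_iff_of_pos (by norm_num) x).1 hx).1)
          (by rw [pv_foldl_pySetD_length, List.length_map]; exact hj),
        pv_foldl_pySetD_getElem? _ _ _ j (fun x hx => ((PySem.List.mem_pyRange_iff_of_pos (by norm_num) x).1 hx).1)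
          (by rw [List.length_map]; exact hj),
        PySem.List.getElem?_map_pyRange_zero _ np.length j hj]
    have hmem : ∀ s : Int, 0 < s → (((j : Nat) : Int) ∈ PySem.List.pyRange 0 (↑np.length) s ↔ s ∣ (j : Int)) := by
      intro s hs
      rw [PySem.List.mem_pyRange_iff_of_pos hs]
      constructor
      · rintro ⟨_, _, h⟩; simpa using h
      · intro h; exact ⟨Int.natCast_nonneg j, by exact_mod_cast hj, by simpa using h⟩
    have hget : PySem.List.pyGetD np ((j : Nat) : Int) 'a' = np[j] := by
      simp [PySem.List.pyGetD_natCast, List.getD_eq_getElem?_getD, List.getElem?_eq_getElem hj]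
    have hASCI : PySem.List.pyGetD
        (List.map (fun c => String.ofList [(PySem.Str.pyGet? (PySem.Int.toStr ((c.toNat : Int))) (-1)).getD ' ']) np)
        ((j : Nat) : Int) "" = String.ofList [(PySem.Str.pyGet? (PySem.Int.toStr ((np[j].toNat : Int))) (-1)).getD ' '] := by
      simp [PySem.List.pyGetD_natCast, List.getD_eq_getElem?_getD, List.getElem?_map, List.getElem?_eq_getElem hj]
    have hd := pv_digit_fact (np[j].toNat) (hbound np[j] (List.getElem_mem hj))
    simp only [Function.comp, hmem 4 (by norm_num), hmem 3 (by norm_num), hmem 2 (by norm_num),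
      PySem.Int.mod_eq_zero_iff_dvd, hget, hASCI, hd]
    split_ifs <;> simp [List.getElem?_map, List.getElem?_eq_getElem hj]
  · -- out of range: both sides are none
    rw [List.getElem?_eq_none, List.getElem?_eq_none]
    · simp only [List.length_map, PySem.List.length_pyRange_one]
      omega
    · rw [pv_foldl_pySetD_length, pv_foldl_pySetD_length, pv_foldl_pySetD_length, List.length_map]
      omega
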